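-- pv_equiv track=rewrite | github.com/Intevation/event-processor | extras/events_api/events_api/serve.py | query_prepare
-- ===== SOURCE A (Python) =====
-- def query_prepare(q):
--     """ Prepares a Query-string
--
--     Args:
--         q: An array of Tuples created with query_build_query
--
--     Returns: A Tuple consisting of a query sting and an array of parameters.
--
--     """
--     q_string = "SELECT * FROM events"  # TODO maybe events should be a variable...
--     params = []
--     # now iterate over q (which had to be created with query_build_query
--     # previously) and should be a list of tuples an concatenate the resulting query.
--     # and a list of query parameters
--     counter = 0
--     for subquerytuple in q:
--         if counter > 0:
--             q_string = q_string + " AND " + subquerytuple[0]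
--             params.append(subquerytuple[1])
--         else:
--             q_string = q_string + " WHERE " + subquerytuple[0]
--             params.append(subquerytuple[1])
--         counter += 1
--     return q_string, params
-- ===== SOURCE B (Python) =====
-- def query_prepare(q):
--     """Build the query string by joining all conditions with ' AND ' (prefixed
--     by ' WHERE ' when any exist) and collect params in one comprehension."""
--     base = "SELECT * FROM events"
--     params = [value for _, value in q]
--     if not q:
--         return base, params
--     return base + " WHERE " + " AND ".join(cond for cond, _ in q), params
-- ===== Notes on version B (the rewrite author's own statement) =====
-- stated objective: simpler
-- what changed: Replaces the counter-driven loop with its per-iteration WHERE/AND branch by one params comprehension plus a single ' AND '.join of the condition strings prefixed by ' WHERE ' when q is non-empty.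
import Mathlib
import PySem

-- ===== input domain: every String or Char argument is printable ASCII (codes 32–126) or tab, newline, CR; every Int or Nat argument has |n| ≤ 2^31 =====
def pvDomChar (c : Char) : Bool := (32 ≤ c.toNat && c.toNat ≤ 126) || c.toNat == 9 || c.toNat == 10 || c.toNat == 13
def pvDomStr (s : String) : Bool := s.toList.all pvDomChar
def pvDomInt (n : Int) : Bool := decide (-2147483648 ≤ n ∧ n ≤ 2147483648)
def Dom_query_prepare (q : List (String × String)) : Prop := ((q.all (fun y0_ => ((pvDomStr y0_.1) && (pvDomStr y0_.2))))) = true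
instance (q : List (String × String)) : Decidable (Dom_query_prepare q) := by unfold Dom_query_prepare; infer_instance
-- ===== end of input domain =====

-- B replaces A's counter-driven loop by a params comprehension plus one ' AND '.join of the
-- conditions prefixed with ' WHERE ' when q is non-empty (objective: simpler).


-- ===== PORT A =====
-- one loop step of A: state = (q_string, params, counter)
def qpStepA (st : String × List String × Int) (t : String × String) : String × List String × Int :=
  if st.2.2 > 0 then (st.1 ++ " AND " ++ t.1, st.2.1 ++ [t.2], st.2.2 + 1)
  else (st.1 ++ " WHERE " ++ t.1, st.2.1 ++ [t.2], st.2.2 + 1)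

def query_prepare (q : List (String × String)) : String × List String :=
  let r := q.foldl qpStepA ("SELECT * FROM events", ([] : List String), (0 : Int))
  (r.1, r.2.1)

-- ===== PORT B =====
def query_prepare_alt (q : List (String × String)) : String × List String :=
  let base := "SELECT * FROM events"
  let params := q.map (fun t => t.2)
  if q.isEmpty then (base, params)
  else (base ++ " WHERE " ++ PySem.Str.join " AND " (q.map (fun t => t.1)), params)

-- ===== PRECONDITION & SPEC =====
def Spec_query_prepare (q : List (String × String)) (out : String × List String) : Prop := out = query_prepare_alt q
instance (q : List (String × String)) (out : String × List String) : Decidable (Spec_query_prepare q out) := by unfold Spec_query_prepare; infer_instance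

-- ===== CLAIM (what is proved, stated in full; the proofs are below) =====
def Claim_equal_query_prepare : Prop := ∀ (q : List (String × String)), Dom_query_prepare q → Spec_query_prepare q (query_prepare q)

-- ===== LEMMAS AND PROOFS =====

-- the tail of A's string: every remaining condition prefixed by " AND "
def qpTailStr : List (String × String) → String
  | [] => ""
  | t :: ts => " AND " ++ t.1 ++ qpTailStr ts

theorem qp_foldl_pos : ∀ (xs : List (String × String)) (s : String) (ps : List String) (c : Int),
    0 < c → xs.foldl qpStepA (s, ps, c) = (s ++ qpTailStr xs, ps ++ xs.map (fun t => t.2), c + xs.length) := by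
  intro xs
  induction xs with
  | nil => intro s ps c _; simp [qpTailStr]
  | cons t ts ih =>
    intro s ps c hc
    have h1 : (0:Int) < c + 1 := by omega
    simp only [List.foldl_cons, qpStepA, if_pos hc, ih _ _ _ h1]
    simp [qpTailStr, String.append_assoc]
    omega

theorem qp_join_eq : ∀ (xs : List (String × String)) (h : String),
    PySem.Chars.join " AND ".toList (h.toList :: xs.map (fun t => t.1.toList))
      = (h ++ qpTailStr xs).toList := by
  intro xs
  induction xs with
  | nil => intro h; simp [PySem.Chars.join, List.intercalate, qpTailStr]
  | cons t ts ih =>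
    intro h
    simp only [List.map_cons, PySem.Chars.join_cons_cons, ih t.1]
    simp [qpTailStr, String.append_assoc]

theorem qp_str_join_eq (xs : List (String × String)) (h : String) :
    PySem.Str.join " AND " (h :: xs.map (fun t => t.1)) = h ++ qpTailStr xs := by
  have h2 := qp_join_eq xs h
  simp only [PySem.Str.join, List.map_cons, List.map_map, Function.comp_def, h2]
  simp

-- ===== VERDICT (by name: the statement is the Claim_ definition above) =====
theorem query_prepare_spec : Claim_equal_query_prepare := by
  intro q _
  unfold Spec_query_prepare query_prepare query_prepare_alt
  cases q with
  | nil => simp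
  | cons t ts =>
    simp only [List.foldl_cons, qpStepA]
    norm_num
    rw [qp_foldl_pos ts _ _ 1 (by norm_num)]
    simp [qp_str_join_eq, String.append_assoc]
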